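-- pv_equiv track=rewrite | github.com/repins267/exa-tools | exa/sigma/converter.py | _check_oracle_confidence
-- ===== SOURCE A (Python) =====
-- from typing import Any
--
-- def _check_oracle_confidence(
--     oracle: dict[str, Any],
--     cim2_field: str,
--     activity_type: str | None,
--     vendor: str | None,
-- ) -> str:
--     """Return 'oracle' if cim2_field is confirmed in the DS/ oracle, else 'schema'."""
--     by_at: dict[str, dict[str, list[str]]] = oracle.get("by_activity_type", {})
--
--     # Priority 1: exact activity_type match
--     if activity_type and cim2_field in by_at.get(activity_type, {}):
--         return "oracle"
--
--     # Priority 2: any activity_type match (field confirmed somewhere in DS/)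
--     if any(cim2_field in fields for fields in by_at.values()):
--         return "oracle"
--
--     return "schema"
-- ===== SOURCE B (Python) =====
-- def _check_oracle_confidence(
--     oracle,
--     cim2_field,
--     activity_type,
--     vendor,
-- ):
--     """Return 'oracle' if cim2_field is confirmed in the DS/ oracle, else 'schema'."""
--     # Build an inverted index: field name -> list of activity types confirming it.
--     index = {}
--     for at, fields in oracle.get("by_activity_type", {}).items():
--         for f in fields:
--             index.setdefault(f, []).append(at)
--     return "oracle" if index.get(cim2_field) else "schema"
-- ===== Notes on version B (the rewrite author's own statement) =====
-- stated objective: alternative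
-- what changed: B builds an inverted index dict mapping each field name to the list of activity types that confirm it (setdefault+append over all inner dicts), then answers with a single dict lookup's truthiness, replacing A's two-priority short-circuit membership scans.
import Mathlib
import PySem

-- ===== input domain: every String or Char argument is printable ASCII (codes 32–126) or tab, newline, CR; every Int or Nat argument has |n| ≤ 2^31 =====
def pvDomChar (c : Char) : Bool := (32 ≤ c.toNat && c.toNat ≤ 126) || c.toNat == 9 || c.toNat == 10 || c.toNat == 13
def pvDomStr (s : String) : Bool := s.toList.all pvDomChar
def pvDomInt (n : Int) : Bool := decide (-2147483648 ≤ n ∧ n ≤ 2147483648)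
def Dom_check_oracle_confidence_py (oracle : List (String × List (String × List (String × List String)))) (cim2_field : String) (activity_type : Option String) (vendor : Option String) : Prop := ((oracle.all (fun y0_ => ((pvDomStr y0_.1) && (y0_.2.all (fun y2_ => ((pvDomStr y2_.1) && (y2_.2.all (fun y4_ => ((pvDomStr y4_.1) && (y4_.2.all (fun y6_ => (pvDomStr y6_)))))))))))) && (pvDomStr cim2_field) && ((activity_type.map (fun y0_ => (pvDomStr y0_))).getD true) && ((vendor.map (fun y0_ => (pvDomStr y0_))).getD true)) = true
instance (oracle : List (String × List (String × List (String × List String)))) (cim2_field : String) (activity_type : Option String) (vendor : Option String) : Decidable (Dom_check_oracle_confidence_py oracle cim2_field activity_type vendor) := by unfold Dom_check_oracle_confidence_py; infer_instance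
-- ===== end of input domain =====

-- B builds an inverted index (field name -> list of confirming activity types) in one nested pass
-- and answers by the truthiness of a single dict lookup (objective: alternative; same return value everywhere).

-- ===== PORT A =====
-- Python dicts arrive as association lists; d.get(k, dflt) is first-match lookup (List.lookup),
-- 'k in d' is a key scan over the pairs, d.values() are the snd components.
def check_oracle_confidence_py (oracle : List (String × List (String × List (String × List String)))) (cim2_field : String) (activity_type : Option String) (vendor : Option String) : String :=
  let by_at := (oracle.lookup "by_activity_type").getD []
  -- Priority 1: exact activity_type match ('activity_type and …': None and "" are falsy)
  if (match activity_type with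
      | some at_ => decide (at_ ≠ "") && ((by_at.lookup at_).getD []).any (fun q => q.1 == cim2_field)
      | none => false) then "oracle"
  -- Priority 2: any activity_type match
  else if by_at.any (fun p => p.2.any (fun q => q.1 == cim2_field)) then "oracle"
  else "schema"

-- ===== PORT B =====
-- index.setdefault(f, []).append(at) is Dict.modify f [] (· ++ [at]); the final
-- 'if index.get(cim2_field)' truthiness (None or [] falsy) is 'getD cim2_field [] ≠ []'.
def check_oracle_confidence_py_alt (oracle : List (String × List (String × List (String × List String)))) (cim2_field : String) (activity_type : Option String) (vendor : Option String) : String :=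
  let by_at := (oracle.lookup "by_activity_type").getD []
  let index : PySem.Dict String (List String) :=
    by_at.foldl (fun d p => p.2.foldl (fun d q => d.modify q.1 [] (· ++ [p.1])) d) PySem.Dict.empty
  if (index.getD cim2_field []) ≠ [] then "oracle" else "schema"

-- ===== PRECONDITION & SPEC =====
def Spec_check_oracle_confidence_py (oracle : List (String × List (String × List (String × List String)))) (cim2_field : String) (activity_type : Option String) (vendor : Option String) (out : String) : Prop := out = check_oracle_confidence_py_alt oracle cim2_field activity_type vendor
instance (oracle : List (String × List (String × List (String × List String)))) (cim2_field : String) (activity_type : Option String) (vendor : Option String) (out : String) : Decidable (Spec_check_oracle_confidence_py oracle cim2_field activity_type vendor out) := by unfold Spec_check_oracle_confidence_py; infer_instance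

-- ===== CLAIM (what is proved, stated in full; the proofs are below) =====
def Claim_equal_check_oracle_confidence_py : Prop := ∀ (oracle : List (String × List (String × List (String × List String)))) (cim2_field : String) (activity_type : Option String) (vendor : Option String), Dom_check_oracle_confidence_py oracle cim2_field activity_type vendor → Spec_check_oracle_confidence_py oracle cim2_field activity_type vendor (check_oracle_confidence_py oracle cim2_field activity_type vendor)

-- ===== LEMMAS AND PROOFS =====

-- one activity's inner loop: what it contributes at key f
theorem getD_inner_loop (fields : List (String × List String)) (at_ : String)
    (d : PySem.Dict String (List String)) (f : String) :
    (fields.foldl (fun d q => d.modify q.1 [] (· ++ [at_])) d).getD f [] =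
      d.getD f [] ++ ((fields.map (fun q => (q.1, at_))).filter (fun r => r.1 == f)).map (·.2) := by
  have h := PySem.Dict.getD_foldl_modify_append (l := fields.map (fun q => (q.1, at_))) (d := d) (c := f)
  rw [List.foldl_map] at h
  exact h

-- the accumulated index is nonempty at f iff f is a field of some activity (or was already there)
theorem getD_index_ne_nil (byAt : List (String × List (String × List String))) (f : String)
    (d : PySem.Dict String (List String)) :
    ((byAt.foldl (fun d p => p.2.foldl (fun d q => d.modify q.1 [] (· ++ [p.1])) d) d).getD f [] ≠ []) ↔
      d.getD f [] ≠ [] ∨ ∃ p ∈ byAt, ∃ q ∈ p.2, q.1 = f := by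
  induction byAt generalizing d with
  | nil => simp
  | cons hd tl ih =>
    rw [List.foldl_cons, ih, getD_inner_loop]
    constructor
    · rintro (h | ⟨p, hp, q, hq, rfl⟩)
      · by_cases h1 : d.getD f [] = []
        · simp only [h1, List.nil_append] at h
          rcases List.exists_mem_of_ne_nil _ h with ⟨x, hx⟩
          simp only [List.mem_map, List.mem_filter] at hx
          obtain ⟨r, ⟨⟨q, hq, rfl⟩, hr⟩, _⟩ := hx
          exact Or.inr ⟨hd, List.mem_cons_self, q, hq, by simpa using hr⟩
        · exact Or.inl h1
      · exact Or.inr ⟨p, List.mem_cons_of_mem _ hp, q, hq, rfl⟩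
    · rintro (h | ⟨p, hp, q, hq, rfl⟩)
      · exact Or.inl (fun hc => h (List.append_eq_nil_iff.mp hc).1)
      · rcases List.mem_cons.mp hp with rfl | hp'
        · have hmem : p.1 ∈ (((p.2.map (fun q' => (q'.1, p.1))).filter
              (fun r => r.1 == q.1)).map (·.2)) := by
            refine List.mem_map.mpr ⟨(q.1, p.1), List.mem_filter.mpr
              ⟨List.mem_map.mpr ⟨q, hq, rfl⟩, by simp⟩, rfl⟩
          exact Or.inl (fun hc =>
            (List.ne_nil_of_mem hmem) ((List.append_eq_nil_iff.mp hc).2))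
        · exact Or.inr ⟨p, hp', q, hq, rfl⟩

-- A's "any activity_type" scan tests the same property
theorem any_scan_iff (byAt : List (String × List (String × List String))) (f : String) :
    byAt.any (fun p => p.2.any (fun q => q.1 == f)) = true ↔ ∃ p ∈ byAt, ∃ q ∈ p.2, q.1 = f := by
  simp [List.any_eq_true]

-- a successful lookup names a member pair
theorem lookup_mem (byAt : List (String × List (String × List String))) (at_ : String)
    (inner : List (String × List String)) (h : byAt.lookup at_ = some inner) : (at_, inner) ∈ byAt := by
  induction byAt with
  | nil => simp at h
  | cons hd tl ih =>
    rw [List.lookup] at h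
    by_cases hk : at_ = hd.1
    · simp only [hk, beq_self_eq_true] at h
      obtain ⟨a, b⟩ := hd
      injection h with h2
      simp_all
    · rw [show (at_ == hd.1) = false from beq_eq_false_iff_ne.mpr hk] at h
      exact List.mem_cons_of_mem _ (ih h)

-- ===== VERDICT (by name: the statement is the Claim_ definition above) =====
theorem check_oracle_confidence_py_spec : Claim_equal_check_oracle_confidence_py := by
  intro oracle cim2_field activity_type vendor hdom
  clear hdom
  simp only [Spec_check_oracle_confidence_py, check_oracle_confidence_py, check_oracle_confidence_py_alt]
  set byAt := (oracle.lookup "by_activity_type").getD [] with hby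
  have hB : ((byAt.foldl (fun d p => p.2.foldl (fun d q => d.modify q.1 [] (· ++ [p.1])) d)
        PySem.Dict.empty).getD cim2_field [] ≠ []) ↔
      ∃ p ∈ byAt, ∃ q ∈ p.2, q.1 = cim2_field := by
    rw [getD_index_ne_nil]
    simp [PySem.Dict.getD_empty]
  by_cases h2 : byAt.any (fun p => p.2.any (fun q => q.1 == cim2_field)) = true
  · have hb' : (byAt.foldl (fun d p => p.2.foldl (fun d q => d.modify q.1 [] (· ++ [p.1])) d)
        PySem.Dict.empty).getD cim2_field [] ≠ [] :=
      hB.mpr ((any_scan_iff byAt cim2_field).mp h2)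
    rw [if_pos hb']
    by_cases h1c : (match activity_type with
        | some at_ => decide (at_ ≠ "") && ((byAt.lookup at_).getD []).any (fun q => q.1 == cim2_field)
        | none => false) = true
    · rw [if_pos h1c]
    · rw [if_neg h1c, if_pos h2]
  · have hb' : ¬ ((byAt.foldl (fun d p => p.2.foldl (fun d q => d.modify q.1 [] (· ++ [p.1])) d)
        PySem.Dict.empty).getD cim2_field [] ≠ []) :=
      fun hcon => h2 ((any_scan_iff byAt cim2_field).mpr (hB.mp hcon))
    rw [if_neg hb']
    have h1 : (match activity_type with
        | some at_ => decide (at_ ≠ "") && ((byAt.lookup at_).getD []).any (fun q => q.1 == cim2_field)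
        | none => false) = false := by
      cases activity_type with
      | none => rfl
      | some at_ =>
        simp only [Bool.and_eq_false_iff]
        by_cases he : at_ = ""
        · exact Or.inl (by simp [he])
        refine Or.inr ?_
        cases hl : byAt.lookup at_ with
        | none => simp
        | some inner =>
          simp only [Option.getD_some]
          by_contra hc
          rw [Bool.not_eq_false, List.any_eq_true] at hc
          obtain ⟨q, hq, hqe⟩ := hc
          exact h2 ((any_scan_iff byAt cim2_field).mpr
            ⟨(at_, inner), lookup_mem byAt at_ inner hl, q, hq, by simpa using hqe⟩)
    rw [h1]
    simp [h2]
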